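-- pv_equiv track=rewrite | github.com/frederickkh/ProjectSayo | ingest_notion_pdfs.py | identify_common_headers
-- ===== SOURCE A (Python) =====
-- from typing import List, Tuple, Optional, Dict, Any
--
-- def identify_common_headers(all_pages: List[str]) -> set:
--     """Return a set of lines that appear on many pages (e.g. headers/footers)."""
--     freq: Dict[str, int] = {}
--     for page in all_pages:
--         for line in set(page.splitlines()):
--             stripped = line.strip()
--             if stripped:
--                 freq[stripped] = freq.get(stripped, 0) + 1
--     threshold = max(1, len(all_pages) // 2)
--     return {line for line, count in freq.items() if count >= threshold}
-- ===== SOURCE B (Python) =====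
-- def identify_common_headers(all_pages):
--     """Return a set of lines that appear on many pages (e.g. headers/footers)."""
--     lines = [s for page in all_pages
--              for s in (l.strip() for l in set(page.splitlines())) if s]
--     counts = {}
--     ordered = sorted(lines)
--     i, n = 0, len(ordered)
--     while i < n:
--         j = i + 1
--         while j < n and ordered[j] == ordered[i]:
--             j += 1
--         counts[ordered[i]] = j - i
--         i = j
--     threshold = max(1, len(all_pages) // 2)
--     return {s for s in dict.fromkeys(lines) if counts.get(s, 0) >= threshold}
-- ===== Notes on version B (the rewrite author's own statement) =====
-- stated objective: alternative
-- what changed: Replaces A's hash-map increment counting with a sort-then-group pass: the flat list of per-page-deduplicated stripped lines is sorted and walked once, each run's length giving that line's frequency; selection then filters the distinct lines in first-occurrence order.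
import Mathlib
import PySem

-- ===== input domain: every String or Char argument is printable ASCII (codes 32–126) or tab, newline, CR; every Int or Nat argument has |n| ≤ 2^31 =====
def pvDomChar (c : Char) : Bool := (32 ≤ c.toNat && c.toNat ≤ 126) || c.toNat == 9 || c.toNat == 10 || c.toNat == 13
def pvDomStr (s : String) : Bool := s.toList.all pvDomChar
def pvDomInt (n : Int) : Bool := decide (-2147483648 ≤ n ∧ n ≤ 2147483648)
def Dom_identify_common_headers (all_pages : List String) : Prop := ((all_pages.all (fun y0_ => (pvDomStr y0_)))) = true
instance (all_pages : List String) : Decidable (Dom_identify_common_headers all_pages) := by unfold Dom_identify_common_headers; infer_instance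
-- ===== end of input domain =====

-- B counts frequencies by sorting the flat list of per-page-deduplicated stripped lines and
-- measuring run lengths in one grouped scan, instead of A's hash-map increments (alternative
-- decomposition, not claimed faster).

-- ===== PORT A =====
def identify_common_headers (all_pages : List String) : List String :=
  let freq : PySem.Dict String Int := all_pages.foldl (fun freq page =>
    (PySem.Set.ofList (PySem.Str.splitlines page)).foldl (fun freq line =>
      let stripped := PySem.Str.strip line
      if stripped ≠ "" then freq.insert stripped (freq.getD stripped 0 + 1) else freq)
      freq) PySem.Dict.empty
  let threshold := max 1 (PySem.Int.floordiv (all_pages.length : Int) 2)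
  PySem.Set.ofList ((freq.items.filter (fun p => p.2 ≥ threshold)).map (·.1))

-- ===== PORT B =====
-- B's while loop over the sorted list: each step records the head's run length and drops the run.
def pvRunCounts (rest : List String) (counts : PySem.Dict String Int) : PySem.Dict String Int :=
  match rest with
  | [] => counts
  | head :: t =>
    let k : Int := 1 + ((t.takeWhile (fun y => y == head)).length : Int)
    pvRunCounts (t.dropWhile (fun y => y == head)) (counts.insert head k)
termination_by rest.length
decreasing_by
  simpa using Nat.lt_succ_of_le (List.Sublist.length_le (List.dropWhile_sublist _))

def identify_common_headers_alt (all_pages : List String) : List String :=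
  let lines := all_pages.flatMap (fun page =>
    ((PySem.Set.ofList (PySem.Str.splitlines page)).map PySem.Str.strip).filter (fun s => s ≠ ""))
  let counts := pvRunCounts (PySem.List.sorted lines (fun x => x) false) PySem.Dict.empty
  let threshold := max 1 (PySem.Int.floordiv (all_pages.length : Int) 2)
  PySem.Set.ofList ((PySem.List.dedup lines).filter (fun s => counts.getD s 0 ≥ threshold))

-- ===== PRECONDITION & SPEC =====
def Spec_identify_common_headers (all_pages : List String) (out : List String) : Prop := out = identify_common_headers_alt all_pages
instance (all_pages : List String) (out : List String) : Decidable (Spec_identify_common_headers all_pages out) := by unfold Spec_identify_common_headers; infer_instance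

-- ===== CLAIM (what is proved, stated in full; the proofs are below) =====
def Claim_equal_identify_common_headers : Prop := ∀ (all_pages : List String), Dom_identify_common_headers all_pages → Spec_identify_common_headers all_pages (identify_common_headers all_pages)

-- ===== LEMMAS AND PROOFS =====

def pvStep (d : PySem.Dict String Int) (s : String) : PySem.Dict String Int := d.insert s (d.getD s 0 + 1)
def pvF (page : String) : List String :=
  ((PySem.Set.ofList (PySem.Str.splitlines page)).map PySem.Str.strip).filter (fun s => s ≠ "")

theorem pv_inner_eq (ls : List String) (d : PySem.Dict String Int) :
    ls.foldl (fun freq line =>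
      let stripped := PySem.Str.strip line
      if stripped ≠ "" then freq.insert stripped (freq.getD stripped 0 + 1) else freq) d
  = (((ls.map PySem.Str.strip).filter (fun s => s ≠ "")).foldl pvStep d) := by
  induction ls generalizing d with
  | nil => rfl
  | cons x t ih =>
    by_cases h : PySem.Str.strip x = ""
    · simpa [List.foldl, List.map, List.filter, h] using ih d
    · simpa [List.foldl, List.map, List.filter, h, pvStep] using
        ih (d.insert (PySem.Str.strip x) (d.getD (PySem.Str.strip x) 0 + 1))

theorem pv_outer_eq (pages : List String) (d : PySem.Dict String Int) :
    pages.foldl (fun freq page =>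
      (PySem.Set.ofList (PySem.Str.splitlines page)).foldl (fun freq line =>
        let stripped := PySem.Str.strip line
        if stripped ≠ "" then freq.insert stripped (freq.getD stripped 0 + 1) else freq) freq) d
  = (pages.flatMap pvF).foldl pvStep d := by
  induction pages generalizing d with
  | nil => rfl
  | cons x t ih =>
    simp only [List.foldl, List.flatMap_cons, List.foldl_append]
    rw [pv_inner_eq, ih]; rfl

-- in the dropWhile-part of a sorted list whose elements are all ≥ head, nothing equals head
theorem pv_dropWhile_ne (t : List String) (head : String)
    (hle0 : t.Pairwise (· ≤ ·)) (hhead : ∀ z ∈ t, head ≤ z) :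
    ∀ z ∈ t.dropWhile (fun y => y == head), z ≠ head := by
  induction t with
  | nil => simp
  | cons y r ih =>
    intro z hz
    by_cases hy : (y == head) = true
    · rw [List.dropWhile_cons, if_pos hy] at hz
      exact ih hle0.of_cons (fun w hw => hhead w (List.mem_cons_of_mem _ hw)) z hz
    · rw [List.dropWhile_cons, if_neg hy] at hz
      have hyne : y ≠ head := fun h => hy (by simp [h])
      have hylt : head < y := lt_of_le_of_ne (hhead y List.mem_cons_self) (Ne.symm hyne)
      rcases List.mem_cons.mp hz with h | h
      · subst h; exact hyne
      · have : y ≤ z := (List.pairwise_cons.mp hle0).1 z h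
        exact fun hc => absurd (hc ▸ this) (not_le_of_gt hylt)

-- run-length counting on a (weakly) sorted list yields exactly each element's count
theorem pv_runCounts_getD (l : List String) (d : PySem.Dict String Int) (s : String)
    (hsort : l.Pairwise (· ≤ ·)) :
    (pvRunCounts l d).getD s 0 = if s ∈ l then (l.count s : Int) else d.getD s 0 := by
  revert hsort
  induction l, d using pvRunCounts.induct with
  | case1 d => intro _; simp [pvRunCounts]
  | case2 d head t k ih =>
    intro hsort
    have hle : ∀ z ∈ t, head ≤ z := fun z hz => (List.pairwise_cons.mp hsort).1 z hz
    have hpair' : (t.dropWhile (fun y => y == head)).Pairwise (· ≤ ·) :=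
      List.Pairwise.sublist (List.dropWhile_sublist _) hsort.of_cons
    have htw : ∀ z ∈ t.takeWhile (fun y => y == head), z = head := by
      intro z hz
      simpa using List.mem_takeWhile_imp hz
    have hdw : ∀ z ∈ t.dropWhile (fun y => y == head), z ≠ head :=
      pv_dropWhile_ne t head hsort.of_cons hle
    have hcount_tw : ((t.takeWhile (fun y => y == head)).count head)
        = (t.takeWhile (fun y => y == head)).length := by
      rw [List.count_eq_length]
      intro b hb; exact (htw b hb).symm
    have hcount_dw : (t.dropWhile (fun y => y == head)).count head = 0 := by
      rw [List.count_eq_zero]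
      intro h; exact hdw head h rfl
    have hsplit : t = t.takeWhile (fun y => y == head) ++ t.dropWhile (fun y => y == head) :=
      (List.takeWhile_append_dropWhile).symm
    rw [pvRunCounts]
    rw [ih hpair', PySem.Dict.getD_insert]
    by_cases hs : s = head
    · subst hs
      have hnotdw : s ∉ t.dropWhile (fun y => y == s) := fun h => hdw s h rfl
      rw [if_neg hnotdw, if_pos rfl, if_pos (show s ∈ s :: t from List.mem_cons_self)]
      have hc : (s :: t).count s = (t.takeWhile (fun y => y == s)).length + 1 := by
        rw [List.count_cons_self]
        conv_lhs => rw [hsplit]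
        rw [List.count_append, hcount_tw, hcount_dw]
      rw [hc]
      show (1 : Int) + ((t.takeWhile (fun y => y == s)).length : Int) = _
      push_cast; ring
    · have hcnt : (head :: t).count s = (t.dropWhile (fun y => y == head)).count s := by
        rw [List.count_cons_of_ne (Ne.symm hs)]
        conv_lhs => rw [hsplit]
        rw [List.count_append]
        have h0 : (t.takeWhile (fun y => y == head)).count s = 0 := by
          rw [List.count_eq_zero]; intro h; exact hs (htw s h)
        omega
      by_cases hmem : s ∈ t.dropWhile (fun y => y == head)
      · have hmem' : s ∈ head :: t := by
          refine List.mem_cons_of_mem _ ?_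
          rw [hsplit]; exact List.mem_append_right _ hmem
        rw [if_pos hmem, if_pos hmem', hcnt]
      · have hmem' : s ∉ head :: t := by
          intro h
          rcases List.mem_cons.mp h with h | h
          · exact hs h
          · rw [hsplit] at h
            rcases List.mem_append.mp h with h | h
            · exact hs (htw s h)
            · exact hmem h
        rw [if_neg hmem, if_neg hmem', if_neg hs]

theorem pv_main (all_pages : List String) :
    identify_common_headers all_pages = identify_common_headers_alt all_pages := by
  unfold identify_common_headers identify_common_headers_alt
  simp only [pv_outer_eq]
  have hstep : (List.flatMap pvF all_pages).foldl pvStep PySem.Dict.empty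
      = PySem.Dict.counter (List.flatMap pvF all_pages) := rfl
  rw [hstep, PySem.Dict.items_counter, List.filter_map, List.map_map,
      PySem.List.dedup_eq_ofList]
  simp only [Function.comp_def, List.map_id']
  have hbody : (fun page => List.filter (fun s => decide (s ≠ ""))
      (List.map PySem.Str.strip (PySem.Set.ofList (PySem.Str.splitlines page)))) = pvF := rfl
  rw [hbody]
  show PySem.Set.ofList _ = PySem.Set.ofList _
  congr 1
  apply List.filter_congr
  intro x hx
  have hx' : x ∈ all_pages.flatMap pvF := (PySem.Set.mem_ofList _ _).mp hx
  rw [pv_runCounts_getD _ _ _ (PySem.List.sorted_pairwise (all_pages.flatMap pvF) (fun x => x))]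
  rw [if_pos ((PySem.List.mem_sorted _ _ _ _).mpr hx')]
  have hcnt : (PySem.List.sorted (all_pages.flatMap pvF) (fun x => x) false).count x
      = (all_pages.flatMap pvF).count x :=
    (PySem.List.sorted_perm _ _ _).count_eq x
  rw [hcnt]

-- ===== VERDICT (by name: the statement is the Claim_ definition above) =====
theorem identify_common_headers_spec : Claim_equal_identify_common_headers := by
  intro all_pages _
  unfold Spec_identify_common_headers
  exact pv_main all_pages
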